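-- pv_equiv track=rewrite | github.com/nickkotakis/compliance-discovery-questionnaire-cloud | backend/integrate_evidence_questions.py | integrate_evidence_questions
-- ===== SOURCE A (Python) =====
-- def integrate_evidence_questions(content: str, evidence_questions: dict) -> str:
--     """Integrate evidence questions into control_questions.py content."""
--
--     lines = content.split('\n')
--     new_lines = []
--     i = 0
--
--     while i < len(lines):
--         line = lines[i]
--         new_lines.append(line)
--
--         # Check if this line defines a control (e.g., 'ac-2': [)
--         for control_id in evidence_questions.keys():
--             if f"'{control_id}':" in line and '[' in line:
--                 # Found a control that needs evidence question
--                 # Find the closing bracket for this control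
--                 indent_level = len(line) - len(line.lstrip())
--                 j = i + 1
--
--                 # Skip to find the last question dict in this control
--                 last_question_end = i
--                 while j < len(lines):
--                     if lines[j].strip().startswith('},'):
--                         last_question_end = j
--                     # Check if we've reached the end of this control's list
--                     if lines[j].strip() == '],' and len(lines[j]) - len(lines[j].lstrip()) == indent_level:
--                         # Insert evidence question before the closing ],
--                         evidence_q = evidence_questions[control_id]
--                         new_lines.append('        {')
--                         new_lines.append("            'type': 'evidence',")
--                         new_lines.append(f"            'question': '{evidence_q}',")
--                         new_lines.append('        },')
--                         break
--                     j += 1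
--                 break
--
--         i += 1
--
--     return '\n'.join(new_lines)
-- ===== SOURCE B (Python) =====
-- def integrate_evidence_questions(content: str, evidence_questions: dict) -> str:
--     """Single backward pass: maintain the set of indent levels that have a
--     closing '],' line later in the file, build the output back-to-front."""
--     keys = list(evidence_questions.keys())
--     out_rev = []   # output lines, in reverse order
--     closes = set() # indent levels of stripped-'],' lines strictly after the current line
--     for line in reversed(content.split('\n')):
--         block = []
--         for cid in keys:
--             if f"'{cid}':" in line and '[' in line:
--                 if (len(line) - len(line.lstrip())) in closes:
--                     q = evidence_questions[cid]
--                     block = ['        {',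
--                              "            'type': 'evidence',",
--                              f"            'question': '{q}',",
--                              '        },']
--                 break
--         if line.strip() == '],':
--             closes.add(len(line) - len(line.lstrip()))
--         out_rev.extend(reversed(block))
--         out_rev.append(line)
--     return '\n'.join(reversed(out_rev))
-- ===== Notes on version B (the rewrite author's own statement) =====
-- stated objective: alternative
-- what changed: A rescans the remainder of the file for a later same-indent '],'-line at every matching control line; B makes one backward pass that maintains the set of indent levels of '],'-lines already seen and builds the output back-to-front, so the forward rescans disappear.
import Mathlib
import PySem

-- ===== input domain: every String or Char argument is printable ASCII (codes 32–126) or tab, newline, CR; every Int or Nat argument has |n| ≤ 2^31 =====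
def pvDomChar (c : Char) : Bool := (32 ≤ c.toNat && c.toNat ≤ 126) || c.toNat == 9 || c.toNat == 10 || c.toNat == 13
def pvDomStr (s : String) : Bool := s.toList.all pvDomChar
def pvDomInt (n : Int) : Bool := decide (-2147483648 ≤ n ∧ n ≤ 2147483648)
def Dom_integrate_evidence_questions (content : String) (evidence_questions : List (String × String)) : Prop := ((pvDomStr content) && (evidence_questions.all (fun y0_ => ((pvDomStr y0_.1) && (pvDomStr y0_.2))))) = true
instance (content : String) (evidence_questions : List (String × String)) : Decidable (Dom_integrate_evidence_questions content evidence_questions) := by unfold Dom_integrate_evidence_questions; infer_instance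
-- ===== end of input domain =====

-- B replaces A's forward rescans for a later '],'-line by one backward pass maintaining
-- the set of indent levels seen on closing lines, building the output back-to-front
-- (objective: alternative algorithm; not measured faster).

-- ===== PORT A =====

-- len(line) - len(line.lstrip())
def pvIndent (l : List Char) : Nat := l.length - (PySem.Chars.lstrip l).length

-- the four inserted lines (shared literal text of both Pythons)
def pvEvBlock (q : String) : List (List Char) :=
  [("        {").toList,
   ("            'type': 'evidence',").toList,
   ("            'question': '").toList ++ q.toList ++ ("',").toList,
   ("        },").toList]

-- the inner `for control_id in evidence_questions.keys(): if f"'{control_id}':" in line and '[' in line: … break`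
-- (identical fragment in both Pythons): first key matching the line, if any
def pvFirstMatch (keys : List String) (line : List Char) : Option String :=
  match keys with
  | [] => none
  | k :: ks =>
    if PySem.Chars.isIn ('\'' :: k.toList ++ ['\'', ':']) line && PySem.Chars.isIn ['['] line
    then some k else pvFirstMatch ks line

-- A's inner `while j < len(lines)` scan: is there a later line with strip == '],' at this indent?
-- (the loop's `last_question_end` variable is dead state — never read — and is not carried here)
def pvFindClose (ls : List (List Char)) (ind : Nat) : Bool :=
  match ls with
  | [] => false
  | l :: t =>
    if PySem.Chars.strip l == ("],").toList && pvIndent l == ind then true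
    else pvFindClose t ind

-- A's outer `while i < len(lines)` loop; `rest` is lines[i:], `t` is lines[i+1:]
def pvLoopA (d : PySem.Dict String String) (rest : List (List Char)) (acc : List (List Char)) : List (List Char) :=
  match rest with
  | [] => acc
  | line :: t =>
    let acc1 := acc ++ [line]
    let acc2 :=
      match pvFirstMatch d.keys line with
      | none => acc1
      | some cid =>
        -- evidence_questions[control_id] cannot miss (cid is a key); getD's default is unreachable
        if pvFindClose t (pvIndent line) then acc1 ++ pvEvBlock (d.getD cid "") else acc1
    pvLoopA d t acc2

def integrate_evidence_questions (content : String) (evidence_questions : List (String × String)) : String :=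
  let d := PySem.Dict.ofList evidence_questions
  let lines := PySem.Chars.splitOn content.toList ['\n']
  String.ofList (PySem.Chars.join ['\n'] (pvLoopA d lines []))

-- ===== PORT B =====

-- one step of B's backward pass: state = (output lines in reverse, indent levels of '],'-lines seen)
def pvStepB (d : PySem.Dict String String) (st : List (List Char) × PySem.Set Nat) (line : List Char) :
    List (List Char) × PySem.Set Nat :=
  let block : List (List Char) :=
    match pvFirstMatch d.keys line with
    | none => []
    | some cid =>
      if PySem.Set.contains st.2 (pvIndent line) then pvEvBlock (d.getD cid "") else []
  let closes :=
    if PySem.Chars.strip line == ("],").toList then PySem.Set.add st.2 (pvIndent line) else st.2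
  (st.1 ++ block.reverse ++ [line], closes)

def integrate_evidence_questions_alt (content : String) (evidence_questions : List (String × String)) : String :=
  let d := PySem.Dict.ofList evidence_questions
  let lines := PySem.Chars.splitOn content.toList ['\n']
  let res := lines.reverse.foldl (pvStepB d) ([], PySem.Set.empty)
  String.ofList (PySem.Chars.join ['\n'] res.1.reverse)

-- ===== PRECONDITION & SPEC =====
def Spec_integrate_evidence_questions (content : String) (evidence_questions : List (String × String)) (out : String) : Prop := out = integrate_evidence_questions_alt content evidence_questions
instance (content : String) (evidence_questions : List (String × String)) (out : String) : Decidable (Spec_integrate_evidence_questions content evidence_questions out) := by unfold Spec_integrate_evidence_questions; infer_instance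

-- ===== CLAIM (what is proved, stated in full; the proofs are below) =====
def Claim_equal_integrate_evidence_questions : Prop := ∀ (content : String) (evidence_questions : List (String × String)), Dom_integrate_evidence_questions content evidence_questions → Spec_integrate_evidence_questions content evidence_questions (integrate_evidence_questions content evidence_questions)

-- ===== LEMMAS AND PROOFS =====

-- the common value of both passes, generalized over a start set s0 of closing indents
def pvBodyS (d : PySem.Dict String String) (s0 : PySem.Set Nat) : List (List Char) → List (List Char)
  | [] => []
  | line :: t =>
    line ::
      (match pvFirstMatch d.keys line with
       | none => []
       | some cid =>
         if pvFindClose t (pvIndent line) || PySem.Set.contains s0 (pvIndent line)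
         then pvEvBlock (d.getD cid "") else []) ++ pvBodyS d s0 t

-- the set component of B's fold
def pvStepSet (s : PySem.Set Nat) (line : List Char) : PySem.Set Nat :=
  if PySem.Chars.strip line == ("],").toList then PySem.Set.add s (pvIndent line) else s

lemma pv_contains_add (s : PySem.Set Nat) (y x : Nat) :
    (PySem.Set.add s y).contains x = (s.contains x || x == y) := by
  by_cases hy : y ∈ s <;> by_cases hx : x = y <;>
    simp_all [PySem.Set.add, PySem.Set.contains]

lemma pv_contains_setOf (t : List (List Char)) (s0 : PySem.Set Nat) (x : Nat) :
    (t.reverse.foldl pvStepSet s0).contains x = (pvFindClose t x || s0.contains x) := by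
  induction t with
  | nil => simp [pvFindClose]
  | cons l t ih =>
    rw [List.reverse_cons, List.foldl_append, List.foldl_cons, List.foldl_nil]
    have hstep : pvStepSet (t.reverse.foldl pvStepSet s0) l
        = if PySem.Chars.strip l == ("],").toList
          then (t.reverse.foldl pvStepSet s0).add (pvIndent l)
          else t.reverse.foldl pvStepSet s0 := rfl
    have hfc : pvFindClose (l :: t) x
        = if PySem.Chars.strip l == ("],").toList && pvIndent l == x
          then true else pvFindClose t x := rfl
    rw [hstep, hfc]
    by_cases h : PySem.Chars.strip l = ("],").toList
    · rw [if_pos (by simp [h]), pv_contains_add, ih]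
      by_cases hx : x = pvIndent l
      · subst hx; simp [h]
      · have hx' : (pvIndent l == x) = false := by simpa using fun hh => hx hh.symm
        have hx'' : (x == pvIndent l) = false := by simpa using hx
        simp [h, hx', hx'']
    · have hb : (PySem.Chars.strip l == ("],").toList) = false := by simpa using h
      rw [if_neg (by simpa using h), ih, hb]
      simp

lemma pv_foldB (d : PySem.Dict String String) (ls : List (List Char))
    (acc : List (List Char)) (s0 : PySem.Set Nat) :
    ls.reverse.foldl (pvStepB d) (acc, s0) =
      (acc ++ (pvBodyS d s0 ls).reverse, ls.reverse.foldl pvStepSet s0) := by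
  induction ls generalizing acc with
  | nil => simp [pvBodyS]
  | cons line t ih =>
    rw [List.reverse_cons, List.foldl_append, List.foldl_cons, List.foldl_nil, ih]
    have heq : pvStepB d (acc ++ (pvBodyS d s0 t).reverse, t.reverse.foldl pvStepSet s0) line
        = (acc ++ (pvBodyS d s0 t).reverse ++
            (match pvFirstMatch d.keys line with
             | none => []
             | some cid =>
               if (t.reverse.foldl pvStepSet s0).contains (pvIndent line)
               then pvEvBlock (d.getD cid "") else []).reverse ++ [line],
           pvStepSet (t.reverse.foldl pvStepSet s0) line) := rfl
    rw [heq]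
    simp only [pv_contains_setOf]
    simp [pvBodyS, List.append_assoc, List.reverse_cons, List.reverse_append,
      List.foldl_append]

lemma pv_loopA (d : PySem.Dict String String) (rest acc : List (List Char)) :
    pvLoopA d rest acc = acc ++ pvBodyS d PySem.Set.empty rest := by
  induction rest generalizing acc with
  | nil => simp [pvLoopA, pvBodyS]
  | cons line t ih =>
    have h1 : pvLoopA d (line :: t) acc = pvLoopA d t
        (match pvFirstMatch d.keys line with
         | none => acc ++ [line]
         | some cid =>
           if pvFindClose t (pvIndent line)
           then (acc ++ [line]) ++ pvEvBlock (d.getD cid "") else acc ++ [line]) := rfl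
    rw [h1]
    cases hm : pvFirstMatch d.keys line with
    | none => rw [ih]; simp [pvBodyS, hm]
    | some cid =>
      by_cases hf : pvFindClose t (pvIndent line) = true
      · simp only [hf, if_true]; rw [ih]; simp [pvBodyS, hm, hf]
      · simp only [Bool.not_eq_true] at hf
        simp only [hf, Bool.false_eq_true, if_false]; rw [ih]
        simp [pvBodyS, hm, hf]

-- ===== VERDICT (by name: the statement is the Claim_ definition above) =====
theorem integrate_evidence_questions_spec : Claim_equal_integrate_evidence_questions := by
  intro content evidence_questions _
  unfold Spec_integrate_evidence_questions
  simp only [integrate_evidence_questions, integrate_evidence_questions_alt, pv_loopA, pv_foldB,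
    List.nil_append, List.reverse_reverse]
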